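-- pv_equiv track=rewrite | github.com/figure-2/Algorithm | programmers/코테_입문/84percent/공던지기.py | solution
-- ===== SOURCE A (Python) =====
-- def solution(numbers, k):
--     answer = 0
--
--     i = 0
--     count = 0
--     while True:
--
--         if len(numbers) == i:
--             i = 0
--             answer = numbers[i]
--             count += 1
--             i += 2
--         elif len(numbers) < i:
--             i = 1
--             answer = numbers[i]
--             count += 1
--             i += 2
--         else:
--             answer = numbers[i]
--             count += 1
--             i += 2
--
--         if count == k:
--             break
--
--     return answer
-- ===== SOURCE B (Python) =====
-- def solution(numbers, k):
--     return numbers[2 * (k - 1) % len(numbers)]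
-- ===== Notes on version B (the rewrite author's own statement) =====
-- stated objective: faster
-- what changed: Replaces the O(k) simulation loop over the alternating index sequence by the closed-form index 2*(k-1) % len(numbers).
import Mathlib
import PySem

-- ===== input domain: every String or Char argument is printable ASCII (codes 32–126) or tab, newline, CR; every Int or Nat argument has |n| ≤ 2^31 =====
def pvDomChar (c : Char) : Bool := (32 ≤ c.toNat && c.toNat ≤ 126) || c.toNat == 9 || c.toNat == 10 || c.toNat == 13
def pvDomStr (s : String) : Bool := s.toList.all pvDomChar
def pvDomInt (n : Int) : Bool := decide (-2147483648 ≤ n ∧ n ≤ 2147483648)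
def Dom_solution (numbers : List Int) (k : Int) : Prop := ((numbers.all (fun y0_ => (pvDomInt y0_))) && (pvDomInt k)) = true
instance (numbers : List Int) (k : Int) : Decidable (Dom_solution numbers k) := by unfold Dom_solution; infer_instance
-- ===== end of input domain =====

-- B replaces A's O(k) pass-simulation loop by the closed-form index 2*(k-1) % len(numbers) (asymptotically faster).


-- ===== PORT A =====
-- literal port of A's `while True` loop; the loop body increments `count` by 1 each
-- iteration and breaks when count == k, so fuel k.toNat makes the same computation total.
def solutionLoop (numbers : List Int) (k : Int) (i count answer : Int) (fuel : Nat) : Int :=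
  match fuel with
  | 0 => answer
  | Nat.succ f =>
    if (numbers.length : Int) = i then
      let i := (0 : Int)
      let answer := PySem.List.pyGetD numbers i 0
      let count := count + 1
      let i := i + 2
      if count = k then answer else solutionLoop numbers k i count answer f
    else if (numbers.length : Int) < i then
      let i := (1 : Int)
      let answer := PySem.List.pyGetD numbers i 0
      let count := count + 1
      let i := i + 2
      if count = k then answer else solutionLoop numbers k i count answer f
    else
      let answer := PySem.List.pyGetD numbers i 0
      let count := count + 1
      let i := i + 2
      if count = k then answer else solutionLoop numbers k i count answer f

def solution (numbers : List Int) (k : Int) : Int :=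
  solutionLoop numbers k 0 0 0 k.toNat

-- ===== PORT B =====
def solution_alt (numbers : List Int) (k : Int) : Int :=
  PySem.List.pyGetD numbers (PySem.Int.mod (2 * (k - 1)) (numbers.length : Int)) 0

-- ===== PRECONDITION & SPEC =====
-- Pre_ excludes exactly the inputs on which Python A does not return: the empty list
-- (IndexError), k ≤ 0 (infinite loop), and a one-element list with k ≥ 2 (A's reset
-- branch reads numbers[1]: IndexError).
def Pre_solution (numbers : List Int) (k : Int) : Prop :=
  numbers ≠ [] ∧ 1 ≤ k ∧ ¬(numbers.length = 1 ∧ 2 ≤ k)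
instance (numbers : List Int) (k : Int) : Decidable (Pre_solution numbers k) := by
  unfold Pre_solution; infer_instance
def pvWitness_solution : List Int × Int := ([3, 5, 7], 4)

def Spec_solution (numbers : List Int) (k : Int) (out : Int) : Prop := out = solution_alt numbers k
instance (numbers : List Int) (k : Int) (out : Int) : Decidable (Spec_solution numbers k out) := by unfold Spec_solution; infer_instance

-- ===== CLAIM (what is proved, stated in full; the proofs are below) =====
def Claim_equal_solution : Prop := ∀ (numbers : List Int) (k : Int), Dom_solution numbers k → Pre_solution numbers k → Spec_solution numbers k (solution numbers k)

-- ===== LEMMAS AND PROOFS =====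

-- Loop invariant: at entry of an iteration with counter c and cursor i we have
-- 0 ≤ i ≤ n+1, i ≡ 2c (mod n), and (if n = 1 then the loop is on its only iteration);
-- the loop then returns numbers[(2*(k-1)) % n].
theorem solutionLoop_eq (numbers : List Int) (k : Int) :
    ∀ (fuel : Nat) (c i answer : Int),
      0 < (numbers.length : Int) →
      (numbers.length = 1 → k = 1) →
      0 ≤ c → c < k →
      0 ≤ i → i ≤ (numbers.length : Int) + 1 →
      (i = (numbers.length : Int) + 1 → 1 < (numbers.length : Int)) →
      i % (numbers.length : Int) = (2 * c) % (numbers.length : Int) →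
      fuel = (k - c).toNat →
      solutionLoop numbers k i c answer fuel
        = PySem.List.pyGetD numbers ((2 * (k - 1)) % (numbers.length : Int)) 0 := by
  intro fuel
  induction fuel with
  | zero =>
    intro c i answer hn _ hc hck _ _ _ _ hf
    omega
  | succ f ih =>
    intro c i answer hn hn1 hc hck hi0 hile hitop hmod hf
    set n : Int := (numbers.length : Int) with hndef
    unfold solutionLoop
    by_cases h1 : n = i
    · -- i = n : reset to 0
      simp only [← hndef]
      rw [if_pos h1]
      have hz : (2 * c) % n = 0 := by
        rw [← hmod, ← h1]; exact Int.emod_self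
      by_cases hbk : c + 1 = k
      · simp only [if_pos hbk]
        have : (2 * (k - 1)) % n = 0 := by
          have : k - 1 = c := by omega
          rw [this]; exact hz
        rw [this]
      · simp only [if_neg hbk]
        exact ih (c + 1) 2 _ hn hn1 (by omega) (by omega) (by omega)
          (by -- 2 ≤ n + 1 : need n ≥ 1
            omega)
          (by intro h2; omega)
          (by -- 2 % n = (2*(c+1)) % n
            have : 2 * (c + 1) = 2 * c + 2 := by ring
            rw [this, Int.add_emod, hz]; simp)
          (by omega)
    · by_cases h2 : n < i
      · -- i = n + 1 (so 1 < n), reset to 1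
        have hieq : i = n + 1 := by omega
        have hn2 : 1 < n := hitop hieq
        simp only [← hndef, if_neg h1, if_pos h2]
        have hone : (2 * c) % n = 1 := by
          rw [← hmod, hieq]
          have h4 : n + 1 = 1 + n * 1 := by ring
          rw [h4, Int.add_mul_emod_self_left, Int.emod_eq_of_lt (by omega) hn2]
        by_cases hbk : c + 1 = k
        · simp only [if_pos hbk]
          have : (2 * (k - 1)) % n = 1 := by
            have : k - 1 = c := by omega
            rw [this]; exact hone
          rw [this]
        · simp only [if_neg hbk]
          exact ih (c + 1) 3 _ hn hn1 (by omega) (by omega) (by omega)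
            (by omega) (by intro h3; omega)
            (by have h5 : 2 * (c + 1) = 2 * c + 2 := by ring
                rw [h5, Int.add_emod (2 * c) 2, hone,
                  show (3 : Int) = 1 + 2 from rfl, Int.add_emod 1 2,
                  Int.emod_eq_of_lt (by omega) hn2])
            (by omega)
      · -- 0 ≤ i < n : use i directly
        have hilt : i < n := by omega
        simp only [← hndef, if_neg h1, if_neg h2]
        have hieq : (2 * c) % n = i := by
          rw [← hmod, Int.emod_eq_of_lt hi0 hilt]
        by_cases hbk : c + 1 = k
        · simp only [if_pos hbk]
          have : (2 * (k - 1)) % n = i := by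
            have : k - 1 = c := by omega
            rw [this]; exact hieq
          rw [this]
        · simp only [if_neg hbk]
          exact ih (c + 1) (i + 2) _ hn hn1 (by omega) (by omega) (by omega)
            (by omega) (by intro h3; omega)
            (by have h5 : 2 * (c + 1) = 2 * c + 2 := by ring
                rw [h5, Int.add_emod (2 * c) 2, hieq, Int.add_emod i 2,
                  Int.emod_eq_of_lt hi0 hilt])
            (by omega)

-- ===== VERDICT (by name: the statement is the Claim_ definition above) =====
theorem solution_spec : Claim_equal_solution := by
  intro numbers k _ hpre
  obtain ⟨hne, hk, hnot⟩ := hpre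
  have hn : 0 < (numbers.length : Int) := by
    cases numbers with
    | nil => exact absurd rfl hne
    | cons a l => simp
  unfold Spec_solution solution solution_alt
  rw [PySem.Int.mod_eq_emod_of_pos hn]
  exact solutionLoop_eq numbers k k.toNat 0 0 0 hn (by omega) le_rfl (by omega)
    le_rfl (by omega) (by omega) (by simp) (by omega)
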